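-- pv_equiv track=rewrite | github.com/thadikari/py_utils | file.py | gen_unique_labels
-- ===== SOURCE A (Python) =====
-- def gen_unique_labels(long_names, tokens=['_', '__']):
--     def inner(strings, token):
--         spls = [ss.split(token) for ss in strings]
--         sets = [set(spl) for spl in spls]
--         common = set().union(*sets)
--         common.intersection_update(*sets)
--         return ['_'.join(it for it in spl if it not in common) for spl in spls]
--
--     if len(long_names)>1:
--         for tk in tokens: long_names = inner(long_names, tk)
--         return long_names
--     else:
--         return ['plot']
-- ===== SOURCE B (Python) =====
-- def gen_unique_labels(long_names, tokens=['_', '__']):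
--     # Recurse over the separator tokens; a token of a split is kept iff some
--     # OTHER string's split lacks it (brute-force existential scan), so no
--     # common set is ever materialised.
--     def strip(names, toks):
--         if not toks:
--             return names
--         tk = toks[0]
--         spls = [s.split(tk) for s in names]
--         kept = ['_'.join(t for t in spl if any(t not in other for other in spls))
--                 for spl in spls]
--         return strip(kept, toks[1:])
--     return strip(long_names, tokens) if len(long_names) > 1 else ['plot']
-- ===== Notes on version B (the rewrite author's own statement) =====
-- stated objective: alternative
-- what changed: B never builds a common-token set at all: it recurses over the token list and decides per token occurrence whether to keep it by an existential membership scan over all split lists (any(t not in other)), replacing A's union-then-intersection set fold with direct brute-force scanning and replacing A's for-loop with structural recursion.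
import Mathlib
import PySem

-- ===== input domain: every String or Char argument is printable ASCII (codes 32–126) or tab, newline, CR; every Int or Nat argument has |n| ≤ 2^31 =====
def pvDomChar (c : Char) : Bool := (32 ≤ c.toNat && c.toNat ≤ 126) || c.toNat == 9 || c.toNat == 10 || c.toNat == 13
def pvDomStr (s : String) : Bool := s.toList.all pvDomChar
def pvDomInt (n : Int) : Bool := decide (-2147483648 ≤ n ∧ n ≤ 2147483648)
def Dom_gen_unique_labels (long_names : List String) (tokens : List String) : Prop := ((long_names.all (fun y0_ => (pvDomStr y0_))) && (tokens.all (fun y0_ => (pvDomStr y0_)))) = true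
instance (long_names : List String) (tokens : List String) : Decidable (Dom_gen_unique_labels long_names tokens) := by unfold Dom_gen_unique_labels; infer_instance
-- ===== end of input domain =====

-- B drops A's union/intersection set machinery entirely: it recurses over the token
-- list and keeps a token iff some split list lacks it, by a direct membership scan
-- (objective: alternative).

-- ss.split(token); total wrapper: 'none' (Python: ValueError on token = "") defaulted,
-- excluded by Pre_gen_unique_labels; used by both ports as the shared split primitive.
def pySplit (ss : String) (token : String) : List String :=
  (PySem.Str.split? ss token).getD []

-- ===== PORT A =====
-- inner(strings, token) of A
def pyInnerA (strings : List String) (token : String) : List String :=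
  let spls := strings.map (fun ss => pySplit ss token)
  let sets := spls.map (fun spl => PySem.Set.ofList spl)
  let common0 : PySem.Set String := sets.foldl (fun acc s => PySem.Set.union acc s) PySem.Set.empty
  let common : PySem.Set String := sets.foldl (fun acc s => PySem.Set.inter acc s) common0
  spls.map (fun spl => PySem.Str.join "_" (spl.filter (fun it => !(PySem.Set.contains common it))))

def gen_unique_labels (long_names : List String) (tokens : List String) : List String :=
  if long_names.length > 1 then
    tokens.foldl (fun ln tk => pyInnerA ln tk) long_names
  else ["plot"]

-- ===== PORT B =====
-- strip(names, toks) of B: structural recursion over the token list; a token is kept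
-- iff some split list does not contain it (existential scan, no common set)
def stripB (names : List String) (toks : List String) : List String :=
  match toks with
  | [] => names
  | tk :: rest =>
      let spls := names.map (fun s => pySplit s tk)
      let kept := spls.map (fun spl =>
        PySem.Str.join "_" (spl.filter (fun t => spls.any (fun other => !(decide (t ∈ other))))))
      stripB kept rest

def gen_unique_labels_alt (long_names : List String) (tokens : List String) : List String :=
  if long_names.length > 1 then stripB long_names tokens else ["plot"]

-- ===== PRECONDITION & SPEC =====
-- Pre_ excludes only inputs on which Python A raises: with more than one name,
-- an empty token makes str.split('') raise ValueError (B raises there too).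
def Pre_gen_unique_labels (long_names : List String) (tokens : List String) : Prop :=
  1 < long_names.length → "" ∉ tokens
instance (long_names : List String) (tokens : List String) : Decidable (Pre_gen_unique_labels long_names tokens) := by unfold Pre_gen_unique_labels; infer_instance

def pvWitness_gen_unique_labels : List String × List String :=
  (["ab_c_x", "de_c_x"], ["_"])

def Spec_gen_unique_labels (long_names : List String) (tokens : List String) (out : List String) : Prop := out = gen_unique_labels_alt long_names tokens
instance (long_names : List String) (tokens : List String) (out : List String) : Decidable (Spec_gen_unique_labels long_names tokens out) := by unfold Spec_gen_unique_labels; infer_instance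

-- ===== CLAIM (what is proved, stated in full; the proofs are below) =====
def Claim_equal_gen_unique_labels : Prop := ∀ (long_names : List String) (tokens : List String), Dom_gen_unique_labels long_names tokens → Pre_gen_unique_labels long_names tokens → Spec_gen_unique_labels long_names tokens (gen_unique_labels long_names tokens)

-- ===== LEMMAS AND PROOFS =====

-- membership in A's union fold
theorem mem_foldl_union (sets : List (PySem.Set String)) (e : PySem.Set String) (y : String) :
    y ∈ sets.foldl (fun acc s => PySem.Set.union acc s) e ↔ y ∈ e ∨ ∃ s ∈ sets, y ∈ s := by
  induction sets generalizing e with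
  | nil => simp
  | cons s rest ih =>
      simp [List.foldl_cons, ih, PySem.Set.mem_union]
      tauto

-- membership in A's intersection fold
theorem mem_foldl_inter (sets : List (PySem.Set String)) (c : PySem.Set String) (y : String) :
    y ∈ sets.foldl (fun acc s => PySem.Set.inter acc s) c ↔ y ∈ c ∧ ∀ s ∈ sets, y ∈ s := by
  induction sets generalizing c with
  | nil => simp
  | cons s rest ih =>
      simp [List.foldl_cons, ih, PySem.Set.mem_inter]
      tauto

-- the kept-token predicates of A and B agree on every token of every split
theorem keep_pred_eq (spls : List (List String)) (spl : List String)
    (hspl : spl ∈ spls) (t : String) (ht : t ∈ spl) :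
    (!(PySem.Set.contains
        ((spls.map (fun spl => PySem.Set.ofList spl)).foldl (fun acc s => PySem.Set.inter acc s)
          ((spls.map (fun spl => PySem.Set.ofList spl)).foldl (fun acc s => PySem.Set.union acc s)
            PySem.Set.empty)) t))
      = spls.any (fun other => !(decide (t ∈ other))) := by
  have hmem : PySem.Set.contains
      ((spls.map (fun spl => PySem.Set.ofList spl)).foldl (fun acc s => PySem.Set.inter acc s)
        ((spls.map (fun spl => PySem.Set.ofList spl)).foldl (fun acc s => PySem.Set.union acc s)
          PySem.Set.empty)) t = true
      ↔ ∀ spl' ∈ spls, t ∈ spl' := by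
    rw [PySem.Set.contains_iff, mem_foldl_inter, mem_foldl_union]
    constructor
    · rintro ⟨-, hall⟩ spl' hspl'
      exact (PySem.Set.mem_ofList spl' t).1 (hall _ (List.mem_map_of_mem hspl'))
    · intro hall
      refine ⟨Or.inr ⟨PySem.Set.ofList spl, List.mem_map_of_mem hspl,
        (PySem.Set.mem_ofList spl t).2 ht⟩, ?_⟩
      intro s hs
      rw [List.mem_map] at hs
      obtain ⟨spl', hspl', rfl⟩ := hs
      exact (PySem.Set.mem_ofList spl' t).2 (hall spl' hspl')
  have hany : spls.any (fun other => !(decide (t ∈ other))) = true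
      ↔ ¬ ∀ spl' ∈ spls, t ∈ spl' := by
    simp [List.any_eq_true]
  by_cases h : ∀ spl' ∈ spls, t ∈ spl'
  · rw [hmem.2 h, Bool.eq_false_iff.2 (fun hc => (hany.1 hc) h)]
    rfl
  · rw [Bool.eq_false_iff.2 (fun hc => h (hmem.1 hc)), hany.2 h]
    rfl

-- one token step: A's inner equals B's per-token rebuild
theorem inner_eq (strings : List String) (tk : String) :
    pyInnerA strings tk
      = (let spls := strings.map (fun s => pySplit s tk)
         spls.map (fun spl =>
           PySem.Str.join "_" (spl.filter (fun t => spls.any (fun other => !(decide (t ∈ other))))))) := by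
  simp only [pyInnerA]
  apply List.map_congr_left
  intro spl hspl
  congr 1
  apply List.filter_congr
  intro t ht
  exact keep_pred_eq _ spl hspl t ht

theorem fold_eq (tokens : List String) (ln : List String) :
    tokens.foldl (fun l tk => pyInnerA l tk) ln = stripB ln tokens := by
  induction tokens generalizing ln with
  | nil => rfl
  | cons tk rest ih =>
      simp only [List.foldl_cons, stripB]
      rw [inner_eq ln tk]
      exact ih _

-- ===== VERDICT (by name: the statement is the Claim_ definition above) =====
theorem gen_unique_labels_spec : Claim_equal_gen_unique_labels := by
  intro long_names tokens _ _
  unfold Spec_gen_unique_labels gen_unique_labels gen_unique_labels_alt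
  by_cases h : 1 < long_names.length
  · rw [if_pos h, if_pos h, fold_eq]
  · rw [if_neg h, if_neg h]
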